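-- pv_equiv track=rewrite | github.com/Fahad-Almaani/Rihal-2024 | solve.py | get_minimum_stars
-- ===== SOURCE A (Python) =====
-- def get_minimum_stars(movie_ratings):
--     n = len(movie_ratings)
--     stars = [1] * n
--
--     # Ensure each movie has at least one star
--     for i in range(1, n):
--         if movie_ratings[i] > movie_ratings[i - 1]:
--             stars[i] = stars[i - 1] + 1
--
--     # Traverse from right to left, ensuring higher-rated movies get more stars
--     for i in range(n - 2, -1, -1):
--         if movie_ratings[i] > movie_ratings[i + 1]:
--             stars[i] = max(stars[i], stars[i + 1] + 1)
--
--     return sum(stars)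
-- ===== SOURCE B (Python) =====
-- def get_minimum_stars(movie_ratings):
--     # Single-pass "slope counting" algorithm: no stars array, O(1) extra space.
--     n = len(movie_ratings)
--     if n == 0:
--         return 0
--     total = 1
--     up = down = peak = 0
--     for i in range(1, n):
--         a, b = movie_ratings[i - 1], movie_ratings[i]
--         if b > a:
--             up += 1
--             down = 0
--             peak = up
--             total += 1 + up
--         elif b == a:
--             up = down = peak = 0
--             total += 1
--         else:
--             up = 0
--             down += 1
--             total += 1 + down - (1 if peak >= down else 0)
--     return total
-- ===== Notes on version B (the rewrite author's own statement) =====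
-- stated objective: faster
-- what changed: Replaces the two-pass stars-array algorithm by the single-pass slope-counting algorithm: one left-to-right scan maintaining the up/down run lengths and the last peak height in O(1) space (with a peak>=down correction), never allocating or re-reading any array.
import Mathlib
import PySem

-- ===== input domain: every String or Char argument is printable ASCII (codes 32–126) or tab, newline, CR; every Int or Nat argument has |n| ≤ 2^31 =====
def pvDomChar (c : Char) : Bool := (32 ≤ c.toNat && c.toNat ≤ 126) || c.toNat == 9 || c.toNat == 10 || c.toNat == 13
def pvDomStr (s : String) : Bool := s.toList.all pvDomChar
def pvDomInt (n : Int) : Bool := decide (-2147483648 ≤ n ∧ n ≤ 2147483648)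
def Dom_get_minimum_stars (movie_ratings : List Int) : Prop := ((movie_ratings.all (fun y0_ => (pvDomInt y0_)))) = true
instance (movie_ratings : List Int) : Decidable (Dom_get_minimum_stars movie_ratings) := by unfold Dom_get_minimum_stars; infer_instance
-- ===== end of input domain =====

-- B replaces A's two-pass stars-array algorithm by the single-pass slope-counting
-- algorithm (state: running total, up/down run lengths, last peak height; no array).

-- ===== PORT A =====
def get_minimum_stars (movie_ratings : List Int) : Int :=
  let stars0 : List Int := List.replicate movie_ratings.length (1 : Int)
  let stars1 := (PySem.List.pyRange 1 (movie_ratings.length : Int) 1).foldl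
    (fun s i =>
      if PySem.List.pyGetD movie_ratings i 0 > PySem.List.pyGetD movie_ratings (i - 1) 0
      then PySem.List.pySetD s i (PySem.List.pyGetD s (i - 1) 0 + 1) else s) stars0
  let stars2 := (PySem.List.pyRange ((movie_ratings.length : Int) - 2) (-1) (-1)).foldl
    (fun s i =>
      if PySem.List.pyGetD movie_ratings i 0 > PySem.List.pyGetD movie_ratings (i + 1) 0
      then PySem.List.pySetD s i (max (PySem.List.pyGetD s i 0) (PySem.List.pyGetD s (i + 1) 0 + 1))
      else s) stars1
  stars2.sum

-- ===== PORT B =====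
-- loop body of Source B: state (total, up, down, peak), i the current index
def pvSlopeStep (r : List Int) (st : Int × Int × Int × Int) (i : Int) : Int × Int × Int × Int :=
  let a := PySem.List.pyGetD r (i - 1) 0
  let b := PySem.List.pyGetD r i 0
  if b > a then
    (st.1 + 1 + (st.2.1 + 1), st.2.1 + 1, 0, st.2.1 + 1)
  else if b = a then
    (st.1 + 1, 0, 0, 0)
  else
    (st.1 + 1 + (st.2.2.1 + 1) - (if st.2.2.2 ≥ st.2.2.1 + 1 then 1 else 0), 0, st.2.2.1 + 1, st.2.2.2)

def get_minimum_stars_alt (movie_ratings : List Int) : Int :=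
  if (movie_ratings.length : Int) = 0 then 0
  else
    ((PySem.List.pyRange 1 (movie_ratings.length : Int) 1).foldl
      (pvSlopeStep movie_ratings) (1, 0, 0, 0)).1

-- ===== PRECONDITION & SPEC =====
def Spec_get_minimum_stars (movie_ratings : List Int) (out : Int) : Prop := out = get_minimum_stars_alt movie_ratings
instance (movie_ratings : List Int) (out : Int) : Decidable (Spec_get_minimum_stars movie_ratings out) := by unfold Spec_get_minimum_stars; infer_instance

-- ===== CLAIM (what is proved, stated in full; the proofs are below) =====
def Claim_equal_get_minimum_stars : Prop := ∀ (movie_ratings : List Int), Dom_get_minimum_stars movie_ratings → Spec_get_minimum_stars movie_ratings (get_minimum_stars movie_ratings)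

-- ===== LEMMAS AND PROOFS =====

-- inc run length (forward), the same for both sides
def incF (r : List Int) : Nat → Int
  | 0 => 1
  | i + 1 => if r.getD (i + 1) 0 > r.getD i 0 then incF r i + 1 else 1

theorem incF_succ' (r : List Int) (k : Nat) (hk : 1 ≤ k) :
    incF r k = if r.getD k 0 > r.getD (k - 1) 0 then incF r (k - 1) + 1 else 1 := by
  obtain ⟨j, rfl⟩ : ∃ j, k = j + 1 := ⟨k - 1, by omega⟩
  simp [incF]

theorem getD_map_range_repl (f : Nat → Int) (k m j : Nat) (hj : j < k) :
    ((List.range k).map f ++ List.replicate m (1 : Int)).getD j 0 = f j := by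
  rw [List.getD_eq_getElem?_getD, List.getElem?_append_left (by simpa using hj)]
  simp [hj]

theorem set_map_range_repl (f : Nat → Int) (k m : Nat) (v : Int) (hm : 1 ≤ m) :
    ((List.range k).map f ++ List.replicate m (1 : Int)).set k v
      = (List.range (k + 1)).map (fun i => if i = k then v else f i)
        ++ List.replicate (m - 1) (1 : Int) := by
  apply List.ext_getElem
  · simp; omega
  · intro i h1 h2
    simp only [List.getElem_set, List.getElem_append, List.length_map, List.length_range,
      List.getElem_map, List.getElem_range, List.getElem_replicate]
    split_ifs <;> first | rfl | omega

theorem map_range_congr (f g : Nat → Int) (k : Nat) (h : ∀ i, i < k → f i = g i) :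
    (List.range k).map f = (List.range k).map g := by
  apply List.map_congr_left; intro i hi; exact h i (List.mem_range.mp hi)

theorem passA1 (r : List Int) (k : Nat) (hk : k ≤ r.length) :
    (PySem.List.pyRange 1 (k : Int) 1).foldl
      (fun s i =>
        if PySem.List.pyGetD r i 0 > PySem.List.pyGetD r (i - 1) 0
        then PySem.List.pySetD s i (PySem.List.pyGetD s (i - 1) 0 + 1) else s)
      (List.replicate r.length (1 : Int))
    = (List.range k).map (incF r) ++ List.replicate (r.length - k) (1 : Int) := by
  induction k with
  | zero => rw [PySem.List.pyRange_one_eq_nil (by norm_num)]; simp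
  | succ k ih =>
    rcases Nat.eq_zero_or_pos k with hk0 | hk1
    · subst hk0
      rw [show ((0 + 1 : Nat) : Int) = 1 by norm_num, PySem.List.pyRange_one_eq_nil le_rfl]
      simp only [List.foldl_nil, zero_add, List.range_one, List.map_cons, List.map_nil]
      rw [show incF r 0 = 1 from rfl,
        show r.length = (r.length - 1) + 1 from by omega, List.replicate_succ]
      simp
    · have hcast : ((k + 1 : Nat) : Int) = (k : Int) + 1 := by push_cast; ring
      rw [hcast, PySem.List.pyRange_one_succ_right (by exact_mod_cast hk1), List.foldl_append,
        ih (by omega), List.foldl_cons, List.foldl_nil]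
      have hc1 : (k : Int) - 1 = ((k - 1 : Nat) : Int) := by
        have := Nat.cast_sub (R := Int) hk1; omega
      rw [hc1]
      simp only [PySem.List.pyGetD_natCast, PySem.List.pySetD_natCast]
      rw [getD_map_range_repl _ _ _ _ (by omega)]
      by_cases hc : r.getD k 0 > r.getD (k - 1) 0
      · rw [if_pos hc, set_map_range_repl _ _ _ _ (by omega),
          show r.length - k - 1 = r.length - (k + 1) from by omega,
          map_range_congr (fun i => if i = k then incF r (k - 1) + 1 else incF r i) (incF r) (k + 1)
            (by intro i hi
                show (if i = k then incF r (k - 1) + 1 else incF r i) = incF r i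
                by_cases hik : i = k
                · subst hik; rw [if_pos rfl, incF_succ' r i hk1, if_pos hc]
                · rw [if_neg hik])]
      · rw [if_neg hc, List.range_succ, List.map_append, List.map_singleton,
          incF_succ' r k hk1, if_neg hc,
          show r.length - k = (r.length - (k + 1)) + 1 from by omega, List.replicate_succ]
        simp

def decF (r : List Int) (i : Nat) : Int :=
  if h : i + 1 < r.length ∧ r.getD i 0 > r.getD (i + 1) 0 then decF r (i + 1) + 1 else 1
termination_by r.length - i
decreasing_by omega

theorem decF_eq (r : List Int) (i : Nat) :
    decF r i = if i + 1 < r.length ∧ r.getD i 0 > r.getD (i + 1) 0 then decF r (i + 1) + 1 else 1 := by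
  rw [decF, dite_eq_ite]

theorem incF_pos (r : List Int) (i : Nat) : 1 ≤ incF r i := by
  cases i with
  | zero => simp [incF]
  | succ k => rw [incF]; split
              · have := incF_pos r k; omega
              · omega

theorem decF_pos (r : List Int) (i : Nat) : 1 ≤ decF r i := by
  rw [decF]; split
  · have := decF_pos r (i + 1); omega
  · omega
termination_by r.length - i
decreasing_by omega

def mixF (r : List Int) (j i : Nat) : Int :=
  if i < j then incF r i else max (incF r i) (decF r i)

theorem getD_map_range (f : Nat → Int) (k j : Nat) (hj : j < k) :
    ((List.range k).map f).getD j 0 = f j := by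
  rw [List.getD_eq_getElem?_getD]; simp [hj]

theorem set_map_range (f : Nat → Int) (k : Nat) (v : Int) (j : Nat) (_hj : j < k) :
    ((List.range k).map f).set j v = (List.range k).map (fun i => if i = j then v else f i) := by
  apply List.ext_getElem
  · simp
  · intro i h1 h2
    simp only [List.getElem_set, List.getElem_map, List.getElem_range]
    split_ifs <;> first | rfl | omega

theorem passA2 (r : List Int) (j : Nat) (hj : j + 1 ≤ r.length) :
    (PySem.List.pyRange ((j : Int) - 1) (-1) (-1)).foldl
      (fun s i =>
        if PySem.List.pyGetD r i 0 > PySem.List.pyGetD r (i + 1) 0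
        then PySem.List.pySetD s i (max (PySem.List.pyGetD s i 0) (PySem.List.pyGetD s (i + 1) 0 + 1))
        else s)
      ((List.range r.length).map (mixF r j))
    = (List.range r.length).map (mixF r 0) := by
  induction j with
  | zero =>
    rw [show ((0 : Nat) : Int) - 1 = -1 from by norm_num,
      PySem.List.pyRange_neg_one_eq_nil le_rfl, List.foldl_nil]
  | succ j ih =>
    rw [show ((j + 1 : Nat) : Int) - 1 = (j : Int) from by push_cast; ring,
      PySem.List.pyRange_neg_one_cons (by omega), List.foldl_cons,
      show (j : Int) + 1 = ((j + 1 : Nat) : Int) from by push_cast; ring]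
    simp only [PySem.List.pyGetD_natCast, PySem.List.pySetD_natCast]
    rw [getD_map_range _ _ _ (by omega), getD_map_range _ _ _ (by omega)]
    by_cases hc : r.getD j 0 > r.getD (j + 1) 0
    · rw [if_pos hc, set_map_range _ _ _ _ (by omega),
        map_range_congr _ (mixF r j) _ (by
          intro i hi
          show (if i = j then max (mixF r (j + 1) j) (mixF r (j + 1) (j + 1) + 1)
                else mixF r (j + 1) i) = mixF r j i
          have hmj : mixF r (j + 1) j = incF r j := if_pos (by omega)
          have hmj1 : mixF r (j + 1) (j + 1) = decF r (j + 1) := by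
            rw [mixF, if_neg (by omega), incF_succ' r (j + 1) (by omega),
              Nat.add_sub_cancel, if_neg (by linarith),
              max_eq_right (decF_pos r (j + 1))]
          by_cases hij : i = j
          · subst hij
            rw [if_pos rfl, hmj, hmj1, mixF, if_neg (by omega),
              decF_eq r i, if_pos ⟨by omega, hc⟩]
          · rw [if_neg hij, mixF, mixF]
            by_cases hlt : i < j
            · rw [if_pos (by omega), if_pos (by omega)]
            · rw [if_neg (by omega), if_neg (by omega)])]
      exact ih (by omega)
    · rw [if_neg hc,
        map_range_congr (mixF r (j + 1)) (mixF r j) _ (by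
          intro i hi
          by_cases hij : i = j
          · subst hij
            rw [mixF, mixF, if_pos (by omega), if_neg (by omega),
              decF_eq r i, if_neg (by intro h; exact hc h.2),
              max_eq_left (incF_pos r i)]
          · rw [mixF, mixF]
            by_cases hlt : i < j
            · rw [if_pos (by omega), if_pos (by omega)]
            · rw [if_neg (by omega), if_neg (by omega)])]
      exact ih (by omega)

theorem A_eq (r : List Int) (hr : 1 ≤ r.length) :
    get_minimum_stars r
      = ((List.range r.length).map (fun i => max (incF r i) (decF r i))).sum := by
  obtain ⟨m, hm⟩ : ∃ m, r.length = m + 1 := ⟨r.length - 1, by omega⟩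
  simp only [get_minimum_stars]
  rw [passA1 r r.length le_rfl]
  simp only [Nat.sub_self, List.replicate_zero, List.append_nil]
  rw [map_range_congr (incF r) (mixF r m) r.length (by
      intro i hi
      rw [mixF]
      by_cases him : i < m
      · rw [if_pos him]
      · rw [if_neg him,
          show decF r i = 1 from by rw [decF_eq, if_neg (by intro h; omega)],
          max_eq_left (incF_pos r i)]),
    show ((r.length : Int) - 2) = ((m : Nat) : Int) - 1 from by omega,
    passA2 r m (by omega),
    map_range_congr (mixF r 0) (fun i => max (incF r i) (decF r i)) r.length (by
      intro i hi; rw [mixF, if_neg (by omega)])]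

-- ===== B-side model: dec run length within the prefix ending at m, trailing-descent count =====

def decP (r : List Int) (m : Nat) (j : Nat) : Int :=
  if h : j < m ∧ r.getD j 0 > r.getD (j + 1) 0 then decP r m (j + 1) + 1 else 1
termination_by m - j
decreasing_by omega

theorem decP_eq (r : List Int) (m j : Nat) :
    decP r m j = if j < m ∧ r.getD j 0 > r.getD (j + 1) 0 then decP r m (j + 1) + 1 else 1 := by
  rw [decP, dite_eq_ite]

def dd (r : List Int) : Nat → Nat
  | 0 => 0
  | m + 1 => if r.getD m 0 > r.getD (m + 1) 0 then dd r m + 1 else 0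

def SumS (r : List Int) (m : Nat) : Int :=
  ∑ j ∈ Finset.range (m + 1), max (incF r j) (decP r m j)

-- structure of the trailing strictly-decreasing run of the prefix 0..m
theorem runStruct (r : List Int) (m : Nat) :
    dd r m ≤ m ∧
    (∀ j, m - dd r m ≤ j → j ≤ m → decP r m j = ((m - j : Nat) : Int) + 1) ∧
    (∀ j, m - dd r m < j → j ≤ m → incF r j = 1) ∧
    (0 < m - dd r m → ¬ r.getD (m - dd r m - 1) 0 > r.getD (m - dd r m) 0) := by
  induction m with
  | zero =>
    refine ⟨le_rfl, ?_, ?_, ?_⟩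
    · intro j h1 h2
      have hj : j = 0 := by omega
      subst hj
      rw [decP_eq, if_neg (by intro h; omega)]
      simp
    · intro j h1 h2; omega
    · intro h; simp [dd] at h
  | succ m ih =>
    obtain ⟨ihd, ihdec, ihinc, ihb⟩ := ih
    have hddeq : dd r (m + 1) = if r.getD m 0 > r.getD (m + 1) 0 then dd r m + 1 else 0 := rfl
    by_cases hdec : r.getD m 0 > r.getD (m + 1) 0
    · have hddm : dd r (m + 1) = dd r m + 1 := by rw [hddeq, if_pos hdec]
      have ht : m + 1 - dd r (m + 1) = m - dd r m := by omega
      refine ⟨by omega, ?_, ?_, ?_⟩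
      · have key : ∀ k j, m + 1 - j ≤ k → m - dd r m ≤ j → j ≤ m + 1 →
            decP r (m + 1) j = ((m + 1 - j : Nat) : Int) + 1 := by
          intro k
          induction k with
          | zero =>
            intro j hk h1 h2
            have hj : j = m + 1 := by omega
            subst hj
            rw [decP_eq, if_neg (by intro h; omega)]
            simp
          | succ k ihk =>
            intro j hk h1 h2
            by_cases hj : j = m + 1
            · subst hj
              rw [decP_eq, if_neg (by intro h; omega)]
              simp
            · have hjm : j ≤ m := by omega
              have hcond : r.getD j 0 > r.getD (j + 1) 0 := by
                by_cases hjm' : j = m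
                · subst hjm'; exact hdec
                · have h2' := ihdec j h1 hjm
                  by_contra hc
                  rw [decP_eq, if_neg (by intro h; exact hc h.2)] at h2'
                  have hmj : (1 : Int) = ((m - j : Nat) : Int) + 1 := h2'
                  have : ((m - j : Nat) : Int) = 0 := by omega
                  have : m - j = 0 := by exact_mod_cast this
                  omega
              rw [decP_eq, if_pos ⟨by omega, hcond⟩,
                ihk (j + 1) (by omega) (by omega) (by omega),
                show m + 1 - j = (m + 1 - (j + 1)) + 1 from by omega]
              push_cast; ring
        intro j h1 h2
        rw [ht] at h1
        exact key (m + 1) j (by omega) h1 h2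
      · intro j h1 h2
        by_cases hj : j = m + 1
        · subst hj
          rw [incF_succ' r (m + 1) (by omega), Nat.add_sub_cancel, if_neg (by omega)]
        · exact ihinc j (by omega) (by omega)
      · intro h
        rw [ht] at h ⊢
        exact ihb h
    · have hddm : dd r (m + 1) = 0 := by rw [hddeq, if_neg hdec]
      refine ⟨by omega, ?_, ?_, ?_⟩
      · intro j h1 h2
        have hj : j = m + 1 := by omega
        subst hj
        rw [decP_eq, if_neg (by intro h; omega)]
        simp
      · intro j h1 h2; omega
      · intro _
        rw [hddm, show m + 1 - 0 - 1 = m from by omega, show m + 1 - 0 = m + 1 from by omega]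
        exact hdec

-- extending the prefix by a non-descent leaves every decP unchanged
theorem decP_ext (r : List Int) (m : Nat) (hnd : ¬ r.getD m 0 > r.getD (m + 1) 0) :
    ∀ k j, m - j ≤ k → j ≤ m → decP r (m + 1) j = decP r m j := by
  intro k
  induction k with
  | zero =>
    intro j h1 h2
    have hj : j = m := by omega
    subst hj
    rw [decP_eq r (j + 1) j, if_neg (by intro h; exact hnd h.2),
      decP_eq r j j, if_neg (by intro h; omega)]
  | succ k ihk =>
    intro j h1 h2
    by_cases hj : j = m
    · subst hj
      rw [decP_eq r (j + 1) j, if_neg (by intro h; exact hnd h.2),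
        decP_eq r j j, if_neg (by intro h; omega)]
    · have hjm : j < m := by omega
      by_cases hc : r.getD j 0 > r.getD (j + 1) 0
      · rw [decP_eq r (m + 1) j, if_pos ⟨by omega, hc⟩, ihk (j + 1) (by omega) (by omega),
          decP_eq r m j, if_pos ⟨hjm, hc⟩]
      · rw [decP_eq r (m + 1) j, if_neg (by intro h; exact hc h.2),
          decP_eq r m j, if_neg (by intro h; exact hc h.2)]

-- extending the prefix by a descent leaves decP unchanged strictly before the run start t
theorem decP_lt (r : List Int) (m t : Nat) (ht : t ≤ m)
    (hb : ¬ r.getD (t - 1) 0 > r.getD t 0) :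
    ∀ k j, t - j ≤ k → j < t → decP r (m + 1) j = decP r m j := by
  intro k
  induction k with
  | zero => intro j h1 h2; omega
  | succ k ihk =>
    intro j h1 h2
    by_cases hc : r.getD j 0 > r.getD (j + 1) 0
    · have hj1 : j + 1 < t := by
        rcases Nat.lt_or_ge (j + 1) t with h | h
        · exact h
        · exfalso
          have e2 : t = j + 1 := by omega
          have e1 : t - 1 = j := by omega
          rw [e1, e2] at hb
          exact hb hc
      rw [decP_eq r (m + 1) j, if_pos ⟨by omega, hc⟩, ihk (j + 1) (by omega) hj1,
        decP_eq r m j, if_pos ⟨by omega, hc⟩]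
    · rw [decP_eq r (m + 1) j, if_neg (by intro h; exact hc h.2),
        decP_eq r m j, if_neg (by intro h; exact hc h.2)]

theorem sum_e (t : Nat) (δ : Int) (d : Nat) :
    ∑ j ∈ Finset.range (t + d + 1),
      (if j = t then δ else if t < j then (1 : Int) else 0) = δ + d := by
  induction d with
  | zero =>
    rw [Nat.add_zero, Finset.sum_range_succ, if_pos rfl,
      Finset.sum_eq_zero (fun j hj => by
        have := Finset.mem_range.mp hj
        rw [if_neg (by omega), if_neg (by omega)])]
    simp
  | succ d ihd =>
    rw [show t + (d + 1) + 1 = (t + d + 1) + 1 from by ring, Finset.sum_range_succ, ihd,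
      if_neg (by omega), if_pos (by omega)]
    push_cast; ring

theorem SumS_succ_nondec (r : List Int) (k : Nat) (hnd : ¬ r.getD k 0 > r.getD (k + 1) 0) :
    SumS r (k + 1) = SumS r k + max (incF r (k + 1)) 1 := by
  unfold SumS
  rw [Finset.sum_range_succ]
  congr 1
  · exact Finset.sum_congr rfl (fun j hj => by
      rw [decP_ext r k hnd k j (by omega) (by have := Finset.mem_range.mp hj; omega)])
  · rw [decP_eq, if_neg (by intro h; omega)]

theorem SumS_succ_dec (r : List Int) (k : Nat) (hdec : r.getD k 0 > r.getD (k + 1) 0) :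
    SumS r (k + 1) = SumS r k + 1 + ((dd r k : Int) + 1) -
      (if incF r (k - dd r k) - 1 ≥ (dd r k : Int) + 1 then 1 else 0) := by
  obtain ⟨hd_le, hdecs, hincs, hb⟩ := runStruct r k
  obtain ⟨hd_le', hdecs', hincs', hb'⟩ := runStruct r (k + 1)
  have hddk : dd r (k + 1) = dd r k + 1 := by
    rw [show dd r (k + 1) = if r.getD k 0 > r.getD (k + 1) 0 then dd r k + 1 else 0 from rfl,
      if_pos hdec]
  have htk : k - dd r k ≤ k := by omega
  have ht' : k + 1 - dd r (k + 1) = k - dd r k := by omega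
  have hlast : max (incF r (k + 1)) (decP r (k + 1) (k + 1)) = 1 := by
    rw [incF_succ' r (k + 1) (by omega), Nat.add_sub_cancel, if_neg (by omega),
      decP_eq, if_neg (by intro h; omega)]
    simp
  unfold SumS
  rw [Finset.sum_range_succ, hlast]
  have hmain : ∑ j ∈ Finset.range (k + 1), max (incF r j) (decP r (k + 1) j)
      = ∑ j ∈ Finset.range (k + 1), (max (incF r j) (decP r k j)
          + (if j = k - dd r k
             then max (incF r (k - dd r k)) ((dd r k : Int) + 2)
                  - max (incF r (k - dd r k)) ((dd r k : Int) + 1)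
             else if k - dd r k < j then 1 else 0)) := by
    refine Finset.sum_congr rfl (fun j hj => ?_)
    have hjk : j ≤ k := by have := Finset.mem_range.mp hj; omega
    by_cases hjt : j = k - dd r k
    · subst hjt
      have hold : decP r k (k - dd r k) = (dd r k : Int) + 1 := by
        rw [hdecs (k - dd r k) le_rfl htk, show k - (k - dd r k) = dd r k from by omega]
      have hnew : decP r (k + 1) (k - dd r k) = (dd r k : Int) + 2 := by
        rw [hdecs' (k - dd r k) (by omega) (by omega),
          show k + 1 - (k - dd r k) = dd r k + 1 from by omega]
        push_cast; ring
      rw [hold, hnew, if_pos rfl]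
      ring
    · by_cases hlt : k - dd r k < j
      · have hone : incF r j = 1 := hincs j hlt hjk
        have hold : decP r k j = ((k - j : Nat) : Int) + 1 := hdecs j (by omega) hjk
        have hnew : decP r (k + 1) j = ((k - j : Nat) : Int) + 2 := by
          rw [hdecs' j (by omega) (by omega), show k + 1 - j = (k - j) + 1 from by omega]
          push_cast; ring
        rw [hone, hold, hnew, if_neg hjt, if_pos hlt,
          max_eq_right (by omega), max_eq_right (by omega)]
        ring
      · have hjlt : j < k - dd r k := by omega
        rw [decP_lt r k (k - dd r k) htk (hb (by omega)) (k - dd r k) j (by omega) hjlt,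
          if_neg hjt, if_neg hlt]
        ring
  rw [hmain, Finset.sum_add_distrib,
    show k + 1 = (k - dd r k) + dd r k + 1 from by omega, sum_e]
  have hP := incF_pos r (k - dd r k)
  by_cases hge : incF r (k - dd r k) ≥ (dd r k : Int) + 2
  · rw [max_eq_left hge, max_eq_left (by omega), if_pos (by omega)]
    ring
  · rw [max_eq_right (by omega), max_eq_right (by omega), if_neg (by omega)]
    ring

theorem passB (r : List Int) (k : Nat) :
    (PySem.List.pyRange 1 ((k + 1 : Nat) : Int) 1).foldl (pvSlopeStep r) (1, 0, 0, 0)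
      = (SumS r k, incF r k - 1, (dd r k : Int), incF r (k - dd r k) - 1) := by
  induction k with
  | zero =>
    rw [show ((0 + 1 : Nat) : Int) = 1 from by norm_num,
      PySem.List.pyRange_one_eq_nil le_rfl, List.foldl_nil]
    have h1 : SumS r 0 = 1 := by
      unfold SumS
      rw [Finset.sum_range_one, decP_eq, if_neg (by intro h; omega)]
      simp [incF]
    rw [h1]
    simp [incF, dd]
  | succ k ih =>
    rw [show ((k + 1 + 1 : Nat) : Int) = ((k + 1 : Nat) : Int) + 1 from by push_cast; ring,
      PySem.List.pyRange_one_succ_right (by exact_mod_cast Nat.one_le_iff_ne_zero.mpr (by omega)),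
      List.foldl_append, ih, List.foldl_cons, List.foldl_nil]
    simp only [pvSlopeStep,
      show ((k + 1 : Nat) : Int) - 1 = ((k : Nat) : Int) from by push_cast; ring,
      PySem.List.pyGetD_natCast]
    by_cases hup : r.getD (k + 1) 0 > r.getD k 0
    · rw [if_pos hup]
      have hinc : incF r (k + 1) = incF r k + 1 := by
        rw [incF_succ' r (k + 1) (by omega), Nat.add_sub_cancel, if_pos hup]
      have hdd : dd r (k + 1) = 0 := by
        rw [show dd r (k + 1) = if r.getD k 0 > r.getD (k + 1) 0 then dd r k + 1 else 0 from rfl,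
          if_neg (by omega)]
      have hsum : SumS r (k + 1) = SumS r k + (incF r k + 1) := by
        rw [SumS_succ_nondec r k (by omega), hinc,
          max_eq_left (by have := incF_pos r k; omega)]
      rw [hsum, hdd, hinc, show k + 1 - 0 = k + 1 from rfl, hinc]
      refine Prod.ext (by push_cast; ring) (Prod.ext (by push_cast; ring) (Prod.ext (by norm_num) (by push_cast; ring)))
    · rw [if_neg hup]
      by_cases heq : r.getD (k + 1) 0 = r.getD k 0
      · rw [if_pos heq]
        have hinc : incF r (k + 1) = 1 := by
          rw [incF_succ' r (k + 1) (by omega), Nat.add_sub_cancel, if_neg hup]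
        have hdd : dd r (k + 1) = 0 := by
          rw [show dd r (k + 1) = if r.getD k 0 > r.getD (k + 1) 0 then dd r k + 1 else 0 from rfl,
            if_neg (by omega)]
        have hsum : SumS r (k + 1) = SumS r k + 1 := by
          rw [SumS_succ_nondec r k (by omega), hinc]; simp
        rw [hsum, hdd, hinc, show k + 1 - 0 = k + 1 from rfl, hinc]
        refine Prod.ext rfl (Prod.ext (by norm_num) (Prod.ext (by norm_num) (by norm_num)))
      · rw [if_neg heq]
        have hdec : r.getD k 0 > r.getD (k + 1) 0 := by omega
        have hinc : incF r (k + 1) = 1 := by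
          rw [incF_succ' r (k + 1) (by omega), Nat.add_sub_cancel, if_neg hup]
        have hdd : dd r (k + 1) = dd r k + 1 := by
          rw [show dd r (k + 1) = if r.getD k 0 > r.getD (k + 1) 0 then dd r k + 1 else 0 from rfl,
            if_pos hdec]
        rw [SumS_succ_dec r k hdec, hdd,
          show k + 1 - (dd r k + 1) = k - dd r k from by omega, hinc]
        refine Prod.ext rfl (Prod.ext (by norm_num) (Prod.ext (by push_cast; ring) rfl))

theorem decP_last (r : List Int) (h : 1 ≤ r.length) :
    ∀ k j, r.length - j ≤ k → decP r (r.length - 1) j = decF r j := by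
  intro k
  induction k with
  | zero =>
    intro j hj
    rw [decP_eq r (r.length - 1) j, if_neg (by intro hc; omega),
      decF_eq r j, if_neg (by intro hc; omega)]
  | succ k ihk =>
    intro j hj
    by_cases hc : j + 1 < r.length ∧ r.getD j 0 > r.getD (j + 1) 0
    · rw [decP_eq r (r.length - 1) j, if_pos ⟨by omega, hc.2⟩, ihk (j + 1) (by omega),
        decF_eq r j, if_pos hc]
    · rw [decP_eq r (r.length - 1) j, if_neg (by intro h'; exact hc ⟨by omega, h'.2⟩),
        decF_eq r j, if_neg hc]

theorem list_sum_range (f : Nat → Int) (n : Nat) :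
    ((List.range n).map f).sum = ∑ j ∈ Finset.range n, f j := by
  induction n with
  | zero => simp
  | succ n ih =>
    rw [List.range_succ, List.map_append, List.sum_append, Finset.sum_range_succ, ih]
    simp

-- ===== VERDICT (by name: the statement is the Claim_ definition above) =====
theorem get_minimum_stars_spec : Claim_equal_get_minimum_stars := by
  intro r _
  show get_minimum_stars r = get_minimum_stars_alt r
  rcases Nat.eq_zero_or_pos r.length with h0 | h1
  · rw [List.eq_nil_of_length_eq_zero h0]
    rfl
  · obtain ⟨m, hm⟩ : ∃ m, r.length = m + 1 := ⟨r.length - 1, by omega⟩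
    rw [A_eq r h1]
    simp only [get_minimum_stars_alt]
    rw [if_neg (by exact_mod_cast (by omega : ¬ r.length = 0)),
      show (r.length : Int) = ((m + 1 : Nat) : Int) from by rw [hm], passB r m,
      list_sum_range]
    show ∑ j ∈ Finset.range r.length, max (incF r j) (decF r j) = SumS r m
    unfold SumS
    rw [hm]
    refine Finset.sum_congr rfl (fun j hj => ?_)
    rw [← decP_last r h1 r.length j (by omega), hm, Nat.add_sub_cancel]
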